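-- pv_equiv track=rewrite | github.com/jonatanwestholm/garageofcode | garageofcode/other/couenne_test.py | compress_piecewise
-- ===== SOURCE A (Python) =====
-- def compress_piecewise(x_data, y_data):
--     N = len(x_data)
--     redundant = []
--
--     for idx in range(N-2):
--         x0, x1, x2 = x_data[idx+0], x_data[idx+1], x_data[idx+2]
--         y0, y1, y2 = y_data[idx+0], y_data[idx+1], y_data[idx+2]
--
--         if (x1 - x0) * (y2 - y0) == (x2 - x0) * (y1 - y0):
--             redundant.append(idx + 1)
--
--     return [xi for idx, xi in enumerate(x_data) if idx not in redundant],\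
--            [yi for idx, yi in enumerate(y_data) if idx not in redundant]
-- ===== SOURCE B (Python) =====
-- def compress_piecewise(x_data, y_data):
--     n = len(x_data)
--     if n < 3:
--         return list(x_data), list(y_data)
--     # reversed accumulators (stacks); seed with the tail that is always kept
--     sx = x_data[n-2:][::-1]
--     sy = y_data[n-2:][::-1]
--     for i in range(n - 3, -1, -1):
--         x0, x1, x2 = x_data[i], x_data[i + 1], x_data[i + 2]
--         y0, y1, y2 = y_data[i], y_data[i + 1], y_data[i + 2]
--         if (x1 - x0) * (y2 - y0) == (x2 - x0) * (y1 - y0):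
--             # point i+1 is collinear with its original neighbours: un-keep it
--             sx.pop()
--             sy.pop()
--         sx.append(x0)
--         sy.append(y0)
--     sx.reverse()
--     sy.reverse()
--     return sx, sy
-- ===== Notes on version B (the rewrite author's own statement) =====
-- stated objective: faster
-- what changed: B replaces A's two-phase shape (build a 'redundant' index list, then two comprehensions filtering by linear membership in it) with a single backward pass that maintains the kept points as two stacks, popping the previously kept point when its original consecutive triple is collinear; no index list or membership test remains.
-- outside the precondition, e.g. on compress_piecewise([0, 1, 2], [0, 1]): A raises IndexError, B raises IndexError
import Mathlib
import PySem

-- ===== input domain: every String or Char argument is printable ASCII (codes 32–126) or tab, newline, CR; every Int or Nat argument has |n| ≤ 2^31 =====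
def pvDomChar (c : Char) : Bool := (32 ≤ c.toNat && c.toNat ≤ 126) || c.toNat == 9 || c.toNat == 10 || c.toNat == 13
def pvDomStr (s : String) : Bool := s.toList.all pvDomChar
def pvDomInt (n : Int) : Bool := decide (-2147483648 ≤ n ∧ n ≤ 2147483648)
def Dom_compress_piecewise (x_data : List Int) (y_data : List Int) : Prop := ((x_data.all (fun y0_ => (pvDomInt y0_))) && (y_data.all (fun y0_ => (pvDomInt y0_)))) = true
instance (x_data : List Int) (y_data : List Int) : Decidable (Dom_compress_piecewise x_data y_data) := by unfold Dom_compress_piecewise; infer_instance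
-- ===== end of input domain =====

-- B replaces A's two-phase shape (redundant-index list, then two membership-filtered
-- comprehensions) with a single backward pass keeping a stack of retained points (pop on a
-- collinear original triple), removing the index list and its membership scans.


-- ===== PORT A =====
-- pyGetD with default 0 is exact here: under Pre_ every index read is in range (A raises
-- exactly when len(x) ≥ 3 and len(y) < len(x), and Pre_ excludes those inputs).
def compress_piecewise (x_data : List Int) (y_data : List Int) : List Int × List Int :=
  let N : Int := x_data.length
  let redundant : List Int :=
    (PySem.List.pyRange 0 (N - 2) 1).foldl (fun red idx =>
      let x0 := PySem.List.pyGetD x_data (idx + 0) 0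
      let x1 := PySem.List.pyGetD x_data (idx + 1) 0
      let x2 := PySem.List.pyGetD x_data (idx + 2) 0
      let y0 := PySem.List.pyGetD y_data (idx + 0) 0
      let y1 := PySem.List.pyGetD y_data (idx + 1) 0
      let y2 := PySem.List.pyGetD y_data (idx + 2) 0
      if (x1 - x0) * (y2 - y0) = (x2 - x0) * (y1 - y0) then red ++ [idx + 1] else red) []
  (((PySem.List.enumerate x_data).filter (fun p => !(redundant.contains p.1))).map (·.2),
   ((PySem.List.enumerate y_data).filter (fun p => !(redundant.contains p.1))).map (·.2))

-- ===== PORT B =====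
-- Source B: backward loop over range(n-3, -1, -1) with two reversed accumulators (stacks);
-- a collinear original triple pops the previously kept point; final reverse.
def compress_piecewise_alt (x_data : List Int) (y_data : List Int) : List Int × List Int :=
  let n : Int := x_data.length
  if n < 3 then (x_data, y_data)
  else
    let s0 : List Int × List Int :=
      ((PySem.List.slice x_data (some (n - 2)) none).reverse,
       (PySem.List.slice y_data (some (n - 2)) none).reverse)
    let s := (PySem.List.pyRange (n - 3) (-1) (-1)).foldl (fun s i =>
      let x0 := PySem.List.pyGetD x_data i 0
      let x1 := PySem.List.pyGetD x_data (i + 1) 0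
      let x2 := PySem.List.pyGetD x_data (i + 2) 0
      let y0 := PySem.List.pyGetD y_data i 0
      let y1 := PySem.List.pyGetD y_data (i + 1) 0
      let y2 := PySem.List.pyGetD y_data (i + 2) 0
      let s := if (x1 - x0) * (y2 - y0) = (x2 - x0) * (y1 - y0)
               then (s.1.dropLast, s.2.dropLast) else s
      (s.1 ++ [x0], s.2 ++ [y0])) s0
    (s.1.reverse, s.2.reverse)

-- ===== PRECONDITION & SPEC =====
-- A raises IndexError exactly when len(x_data) ≥ 3 and len(y_data) < len(x_data); Pre_ excludes only those.
def Pre_compress_piecewise (x_data : List Int) (y_data : List Int) : Prop :=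
  x_data.length < 3 ∨ x_data.length ≤ y_data.length
instance (x_data : List Int) (y_data : List Int) : Decidable (Pre_compress_piecewise x_data y_data) := by unfold Pre_compress_piecewise; infer_instance
def pvWitness_compress_piecewise : List Int × List Int := ([0, 1, 5], [0, 2, 4])

def Spec_compress_piecewise (x_data : List Int) (y_data : List Int) (out : List Int × List Int) : Prop := out = compress_piecewise_alt x_data y_data
instance (x_data : List Int) (y_data : List Int) (out : List Int × List Int) : Decidable (Spec_compress_piecewise x_data y_data out) := by unfold Spec_compress_piecewise; infer_instance

-- ===== CLAIM (what is proved, stated in full; the proofs are below) =====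
def Claim_equal_compress_piecewise : Prop := ∀ (x_data : List Int) (y_data : List Int), Dom_compress_piecewise x_data y_data → Pre_compress_piecewise x_data y_data → Spec_compress_piecewise x_data y_data (compress_piecewise x_data y_data)

-- ===== LEMMAS AND PROOFS =====

-- keep(j): point j is retained — endpoints always, interior j iff its original triple is not collinear
def pvKeep (x_data y_data : List Int) (j : Int) : Bool :=
  if 0 < j ∧ j < (x_data.length : Int) - 1 then
    (PySem.List.pyGetD x_data j 0 - PySem.List.pyGetD x_data (j - 1) 0) *
      (PySem.List.pyGetD y_data (j + 1) 0 - PySem.List.pyGetD y_data (j - 1) 0) !=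
    (PySem.List.pyGetD x_data (j + 1) 0 - PySem.List.pyGetD x_data (j - 1) 0) *
      (PySem.List.pyGetD y_data j 0 - PySem.List.pyGetD y_data (j - 1) 0)
  else true

-- the retained values of l strictly after index i
def pvSeg (x_data y_data l : List Int) (i : Int) : List Int :=
  ((PySem.List.pyRange (i + 1) (l.length : Int) 1).filter (pvKeep x_data y_data)).map
    (fun j => PySem.List.pyGetD l j 0)

-- the suffix of the result from index i on (i itself always kept as window head)
def pvG (x_data y_data l : List Int) (i : Int) : List Int :=
  PySem.List.pyGetD l i 0 :: pvSeg x_data y_data l i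


-- the collinearity test of A at loop variable idx
def pvCond (x_data : List Int) (y_data : List Int) (idx : Int) : Bool :=
  decide ((PySem.List.pyGetD x_data (idx + 1) 0 - PySem.List.pyGetD x_data (idx + 0) 0) *
            (PySem.List.pyGetD y_data (idx + 2) 0 - PySem.List.pyGetD y_data (idx + 0) 0) =
          (PySem.List.pyGetD x_data (idx + 2) 0 - PySem.List.pyGetD x_data (idx + 0) 0) *
            (PySem.List.pyGetD y_data (idx + 1) 0 - PySem.List.pyGetD y_data (idx + 0) 0))

-- the step of B's backward loop, named for the proofs
def pvStepB (x_data y_data : List Int) (s : List Int × List Int) (i : Int) : List Int × List Int :=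
  let x0 := PySem.List.pyGetD x_data i 0
  let x1 := PySem.List.pyGetD x_data (i + 1) 0
  let x2 := PySem.List.pyGetD x_data (i + 2) 0
  let y0 := PySem.List.pyGetD y_data i 0
  let y1 := PySem.List.pyGetD y_data (i + 1) 0
  let y2 := PySem.List.pyGetD y_data (i + 2) 0
  let s := if (x1 - x0) * (y2 - y0) = (x2 - x0) * (y1 - y0)
           then (s.1.dropLast, s.2.dropLast) else s
  (s.1 ++ [x0], s.2 ++ [y0])

lemma pvAlt_unfold (x_data y_data : List Int) (h : ¬ ((x_data.length : Int) < 3)) :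
    compress_piecewise_alt x_data y_data =
      (let s := (PySem.List.pyRange ((x_data.length : Int) - 3) (-1) (-1)).foldl
          (pvStepB x_data y_data)
          ((PySem.List.slice x_data (some ((x_data.length : Int) - 2)) none).reverse,
           (PySem.List.slice y_data (some ((x_data.length : Int) - 2)) none).reverse)
       (s.1.reverse, s.2.reverse)) := by
  unfold compress_piecewise_alt
  rw [if_neg h]
  rfl

lemma pvRedundant_eq (x_data y_data : List Int) (N : Int) :
    (PySem.List.pyRange 0 (N - 2) 1).foldl (fun red idx =>
      let x0 := PySem.List.pyGetD x_data (idx + 0) 0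
      let x1 := PySem.List.pyGetD x_data (idx + 1) 0
      let x2 := PySem.List.pyGetD x_data (idx + 2) 0
      let y0 := PySem.List.pyGetD y_data (idx + 0) 0
      let y1 := PySem.List.pyGetD y_data (idx + 1) 0
      let y2 := PySem.List.pyGetD y_data (idx + 2) 0
      if (x1 - x0) * (y2 - y0) = (x2 - x0) * (y1 - y0) then red ++ [idx + 1] else red) [] =
    (((PySem.List.pyRange 0 (N - 2) 1).filter (pvCond x_data y_data)).map (· + 1)) := by
  have h := PySem.List.foldl_append_if (pvCond x_data y_data) (· + 1)
      (PySem.List.pyRange 0 (N - 2) 1) ([] : List Int)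
  simpa [pvCond, decide_eq_true_eq] using h

lemma pvKeep_eq_not_contains (x_data y_data : List Int) (i : Int) :
    pvKeep x_data y_data i =
      !(((((PySem.List.pyRange 0 ((x_data.length : Int) - 2) 1).filter
            (pvCond x_data y_data)).map (· + 1)).contains i)) := by
  rw [Bool.eq_iff_iff]
  simp only [pvKeep, pvCond, Bool.not_eq_true', List.contains_eq_mem, List.mem_map,
    List.mem_filter, PySem.List.mem_pyRange_one, decide_eq_true_eq, decide_eq_false_iff_not]
  by_cases hc : 0 < i ∧ i < (x_data.length : Int) - 1
  · rw [if_pos hc, bne_iff_ne]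
    constructor
    · rintro hne ⟨j, ⟨⟨hj0, hj1⟩, hcol⟩, hji⟩
      have hji' : j = i - 1 := by omega
      subst hji'
      have e0 : i - 1 + 0 = i - 1 := by ring
      have e1 : i - 1 + 1 = i := by ring
      have e2 : i - 1 + 2 = i + 1 := by ring
      rw [e0, e1, e2] at hcol
      exact hne hcol
    · intro hnm hcol
      apply hnm
      refine ⟨i - 1, ⟨⟨by omega, by omega⟩, ?_⟩, by ring⟩
      have e0 : i - 1 + 0 = i - 1 := by ring
      have e1 : i - 1 + 1 = i := by ring
      have e2 : i - 1 + 2 = i + 1 := by ring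
      rw [e0, e1, e2]
      exact hcol
  · rw [if_neg hc]
    simp only [true_iff]
    rintro ⟨j, ⟨⟨hj0, hj1⟩, _⟩, hji⟩
    exact hc (by omega)

-- A's two comprehensions, as a filtered index range (l is x_data or y_data)
lemma pvA_filter (x_data y_data l : List Int) :
    ((PySem.List.enumerate l).filter (fun p =>
        !((((PySem.List.pyRange 0 ((x_data.length : Int) - 2) 1).filter
            (pvCond x_data y_data)).map (· + 1)).contains p.1))).map (·.2) =
      ((PySem.List.pyRange 0 (l.length : Int) 1).filter (pvKeep x_data y_data)).map
        (fun j => PySem.List.pyGetD l j 0) := by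
  rw [show (fun p : Int × Int =>
        !((((PySem.List.pyRange 0 ((x_data.length : Int) - 2) 1).filter
            (pvCond x_data y_data)).map (· + 1)).contains p.1)) =
      (fun p : Int × Int => pvKeep x_data y_data p.1) from
    funext fun p => (pvKeep_eq_not_contains x_data y_data p.1).symm]
  rw [PySem.List.enumerate_eq_map_pyRange (d := 0), List.filter_map, List.map_map]
  simp only [Function.comp_def]
  rfl

lemma pvHead_split (x_data y_data l : List Int) (h : 0 < l.length) :
    ((PySem.List.pyRange 0 (l.length : Int) 1).filter (pvKeep x_data y_data)).map
        (fun j => PySem.List.pyGetD l j 0) = pvG x_data y_data l 0 := by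
  unfold pvG pvSeg
  rw [PySem.List.pyRange_one_cons (by exact_mod_cast h)]
  rw [List.filter_cons]
  have hk0 : pvKeep x_data y_data 0 = true := by
    unfold pvKeep
    rw [if_neg (by omega)]
  simp [hk0]

lemma pvSeg_cons (x_data y_data l : List Int) (i : Int) (h1 : i + 1 < (l.length : Int)) :
    pvSeg x_data y_data l i =
      (if pvKeep x_data y_data (i + 1) then [PySem.List.pyGetD l (i + 1) 0] else []) ++
        pvSeg x_data y_data l (i + 1) := by
  unfold pvSeg
  rw [PySem.List.pyRange_one_cons h1, List.filter_cons]
  by_cases hk : pvKeep x_data y_data (i + 1) = true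
  · simp [hk]
  · simp [hk]

lemma pvBase (x_data y_data l : List Int) (hn : 3 ≤ (x_data.length : Int))
    (hl : x_data.length ≤ l.length) :
    PySem.List.slice l (some ((x_data.length : Int) - 2)) none =
      pvG x_data y_data l ((x_data.length : Int) - 2) := by
  unfold pvG pvSeg
  rw [PySem.List.slice_from l (by omega)]
  have hfilter :
      (PySem.List.pyRange ((x_data.length : Int) - 2 + 1) (l.length : Int) 1).filter
        (pvKeep x_data y_data) =
      PySem.List.pyRange ((x_data.length : Int) - 2 + 1) (l.length : Int) 1 := by
    apply List.filter_eq_self.mpr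
    intro j hj
    rw [PySem.List.mem_pyRange_one] at hj
    unfold pvKeep
    rw [if_neg (by omega)]
  rw [hfilter]
  rw [PySem.List.map_pyGetD_pyRange' l 0 (by omega)]
  have hlt : ((x_data.length : Int) - 2).toNat < l.length := by omega
  rw [List.drop_eq_getElem_cons hlt]
  rw [PySem.List.pyGetD_eq_getElem l 0 (by omega) (by omega)]
  congr 1
  have : ((x_data.length : Int) - 2 + 1).toNat = ((x_data.length : Int) - 2).toNat + 1 := by omega
  rw [this]

lemma pvStep (x_data y_data : List Int) (_hn : 3 ≤ (x_data.length : Int))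
    (hy : x_data.length ≤ y_data.length) (i : Int) (h0 : 0 ≤ i)
    (h1 : i ≤ (x_data.length : Int) - 3) :
    pvStepB x_data y_data
        ((pvG x_data y_data x_data (i + 1)).reverse, (pvG x_data y_data y_data (i + 1)).reverse) i
      = ((pvG x_data y_data x_data i).reverse, (pvG x_data y_data y_data i).reverse) := by
  have hyl : (x_data.length : Int) ≤ (y_data.length : Int) := by exact_mod_cast hy
  have hxlen : i + 1 < (x_data.length : Int) := by omega
  have hylen : i + 1 < (y_data.length : Int) := by omega
  have hk : pvKeep x_data y_data (i + 1) =
      ((PySem.List.pyGetD x_data (i + 1) 0 - PySem.List.pyGetD x_data i 0) *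
          (PySem.List.pyGetD y_data (i + 2) 0 - PySem.List.pyGetD y_data i 0) !=
        (PySem.List.pyGetD x_data (i + 2) 0 - PySem.List.pyGetD x_data i 0) *
          (PySem.List.pyGetD y_data (i + 1) 0 - PySem.List.pyGetD y_data i 0)) := by
    unfold pvKeep
    rw [if_pos ⟨by omega, by omega⟩]
    rw [show i + 1 - 1 = i from by ring, show i + 1 + 1 = i + 2 from by ring]
  unfold pvStepB
  dsimp only
  by_cases hc :
      (PySem.List.pyGetD x_data (i + 1) 0 - PySem.List.pyGetD x_data i 0) *
          (PySem.List.pyGetD y_data (i + 2) 0 - PySem.List.pyGetD y_data i 0) =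
        (PySem.List.pyGetD x_data (i + 2) 0 - PySem.List.pyGetD x_data i 0) *
          (PySem.List.pyGetD y_data (i + 1) 0 - PySem.List.pyGetD y_data i 0)
  · rw [if_pos hc]
    have hkf : pvKeep x_data y_data (i + 1) = false := by rw [hk]; simp [hc]
    have hsx : pvSeg x_data y_data x_data i = pvSeg x_data y_data x_data (i + 1) := by
      rw [pvSeg_cons x_data y_data x_data i hxlen, hkf]; simp
    have hsy : pvSeg x_data y_data y_data i = pvSeg x_data y_data y_data (i + 1) := by
      rw [pvSeg_cons x_data y_data y_data i hylen, hkf]; simp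
    unfold pvG
    rw [hsx, hsy]
    simp [List.reverse_cons]
  · rw [if_neg hc]
    have hkt : pvKeep x_data y_data (i + 1) = true := by rw [hk]; simp [hc]
    have hsx : pvSeg x_data y_data x_data i =
        PySem.List.pyGetD x_data (i + 1) 0 :: pvSeg x_data y_data x_data (i + 1) := by
      rw [pvSeg_cons x_data y_data x_data i hxlen, hkt]; simp
    have hsy : pvSeg x_data y_data y_data i =
        PySem.List.pyGetD y_data (i + 1) 0 :: pvSeg x_data y_data y_data (i + 1) := by
      rw [pvSeg_cons x_data y_data y_data i hylen, hkt]; simp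
    unfold pvG
    rw [hsx, hsy]
    simp [List.reverse_cons]

lemma pvFold (x_data y_data : List Int) (hn : 3 ≤ (x_data.length : Int))
    (hy : x_data.length ≤ y_data.length) (k : Nat) (hk : (k : Int) ≤ (x_data.length : Int) - 3) :
    (PySem.List.pyRange (k : Int) (-1) (-1)).foldl (pvStepB x_data y_data)
        ((pvG x_data y_data x_data ((k : Int) + 1)).reverse,
         (pvG x_data y_data y_data ((k : Int) + 1)).reverse)
      = ((pvG x_data y_data x_data 0).reverse, (pvG x_data y_data y_data 0).reverse) := by
  induction k with
  | zero =>
    push_cast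
    rw [PySem.List.pyRange_neg_one_cons (by omega), show (0:Int) - 1 = -1 from by ring,
      PySem.List.pyRange_neg_one_eq_nil (le_refl _), List.foldl_cons, List.foldl_nil]
    exact pvStep x_data y_data hn hy 0 (le_refl _) (by push_cast at hk; omega)
  | succ k ih =>
    have hc : ((k + 1 : Nat) : Int) = (k : Int) + 1 := by push_cast; ring
    rw [hc] at hk ⊢
    rw [PySem.List.pyRange_neg_one_cons (by omega), show (k : Int) + 1 - 1 = (k : Int) from by ring,
      List.foldl_cons]
    rw [pvStep x_data y_data hn hy ((k : Int) + 1) (by omega) (by omega)]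
    exact ih (by omega)

theorem compress_piecewise_spec : Claim_equal_compress_piecewise := by
  intro x_data y_data _ hpre
  show compress_piecewise x_data y_data = compress_piecewise_alt x_data y_data
  by_cases h3 : (x_data.length : Int) < 3
  · -- fewer than 3 points: A's redundant list is empty, B returns the inputs
    unfold compress_piecewise compress_piecewise_alt
    dsimp only
    rw [if_pos h3, PySem.List.pyRange_one_eq_nil (by omega)]
    simp [PySem.List.map_snd_enumerate]
  · have hy : x_data.length ≤ y_data.length := by
      rcases hpre with h | h
      · omega
      · exact h
    have hn : 3 ≤ (x_data.length : Int) := by omega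
    -- A's side
    unfold compress_piecewise
    dsimp only
    rw [pvRedundant_eq]
    rw [pvA_filter x_data y_data x_data, pvA_filter x_data y_data y_data]
    rw [pvHead_split x_data y_data x_data (by omega), pvHead_split x_data y_data y_data (by omega)]
    -- B's side
    rw [pvAlt_unfold x_data y_data h3]
    have hcast : ((((x_data.length : Int) - 3).toNat : Int)) = (x_data.length : Int) - 3 := by omega
    rw [pvBase x_data y_data x_data hn (le_refl _), pvBase x_data y_data y_data hn hy]
    rw [← hcast]
    have h2 : ((((x_data.length : Int) - 3).toNat : Int)) + 1 = (x_data.length : Int) - 2 := by omega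
    rw [← h2]
    rw [pvFold x_data y_data hn hy _ (by omega)]
    simp
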